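-- pv_equiv track=rewrite | github.com/hrygo/hotplex-worker | .agent/skills/hotplex-issue-manager/scripts/calc-roi.py | estimate_impact_from_labels
-- ===== SOURCE A (Python) =====
-- def estimate_impact_from_labels(labels):
--     """Estimate impact from priority labels"""
--     label_names = [l.get('name', '') for l in labels]
--
--     if 'P1' in label_names or 'security' in label_names:
--         return 10
--     if 'P2' in label_names:
--         return 8
--     if 'P3' in label_names:
--         return 5
--     if 'documentation' in label_names:
--         return 4
--
--     return 6  # Default medium impact
-- ===== SOURCE B (Python) =====
-- _SCORES = {'P1': 10, 'security': 10, 'P2': 8, 'P3': 5, 'documentation': 4}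
--
--
-- def estimate_impact_from_labels(labels):
--     """Estimate impact from priority labels"""
--     scores = [_SCORES[n] for n in (l.get('name', '') for l in labels) if n in _SCORES]
--     return max(scores) if scores else 6
-- ===== Notes on version B (the rewrite author's own statement) =====
-- stated objective: simpler
-- what changed: Replaces the four ordered membership checks over the name list with a single score-table lookup per label and a max-aggregate with default 6, relying on priority order coinciding with descending scores.
import Mathlib
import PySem

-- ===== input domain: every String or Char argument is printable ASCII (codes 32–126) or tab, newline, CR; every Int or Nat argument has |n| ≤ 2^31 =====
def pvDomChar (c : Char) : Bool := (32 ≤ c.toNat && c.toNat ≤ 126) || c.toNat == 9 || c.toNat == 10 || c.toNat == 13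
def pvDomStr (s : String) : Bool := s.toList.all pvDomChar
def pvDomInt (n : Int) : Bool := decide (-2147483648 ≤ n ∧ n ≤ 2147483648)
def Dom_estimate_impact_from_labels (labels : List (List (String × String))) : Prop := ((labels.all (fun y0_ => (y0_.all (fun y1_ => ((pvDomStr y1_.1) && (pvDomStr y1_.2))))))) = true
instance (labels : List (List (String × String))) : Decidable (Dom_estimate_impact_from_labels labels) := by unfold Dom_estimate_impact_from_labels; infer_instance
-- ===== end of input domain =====

-- B replaces A's four ordered membership checks by a score-table lookup plus a max-aggregate (objective: simpler).

-- l.get('name', '') on an association list (first match), used by both Pythons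
def pvGetName (l : List (String × String)) : String :=
  ((l.find? (fun p => p.1 == "name")).map (fun p => p.2)).getD ""

-- ===== PORT A =====
def estimate_impact_from_labels (labels : List (List (String × String))) : Int :=
  let label_names := labels.map pvGetName
  if label_names.contains "P1" || label_names.contains "security" then 10
  else if label_names.contains "P2" then 8
  else if label_names.contains "P3" then 5
  else if label_names.contains "documentation" then 4
  else 6

-- ===== PORT B =====
def pvScoreTable : PySem.Dict String Int :=
  PySem.Dict.ofList [("P1", 10), ("security", 10), ("P2", 8), ("P3", 5), ("documentation", 4)]

def estimate_impact_from_labels_alt (labels : List (List (String × String))) : Int :=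
  let scores := (labels.map pvGetName).filterMap (fun n => PySem.Dict.get? pvScoreTable n)
  match PySem.List.max? scores (fun x => x) with
  | some m => m
  | none => 6

-- ===== PRECONDITION & SPEC =====
def Spec_estimate_impact_from_labels (labels : List (List (String × String))) (out : Int) : Prop := out = estimate_impact_from_labels_alt labels
instance (labels : List (List (String × String))) (out : Int) : Decidable (Spec_estimate_impact_from_labels labels out) := by unfold Spec_estimate_impact_from_labels; infer_instance

-- ===== CLAIM (what is proved, stated in full; the proofs are below) =====
def Claim_equal_estimate_impact_from_labels : Prop := ∀ (labels : List (List (String × String))), Dom_estimate_impact_from_labels labels → Spec_estimate_impact_from_labels labels (estimate_impact_from_labels labels)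

-- ===== LEMMAS AND PROOFS =====

lemma score_items : pvScoreTable.items =
    [("P1", (10 : Int)), ("security", 10), ("P2", 8), ("P3", 5), ("documentation", 4)] := by
  decide

-- inversion: every table hit is one of the five (key, value) pairs
lemma score_inv (n : String) (s : Int) (h : PySem.Dict.get? pvScoreTable n = some s) :
    (n = "P1" ∧ s = 10) ∨ (n = "security" ∧ s = 10) ∨ (n = "P2" ∧ s = 8) ∨
    (n = "P3" ∧ s = 5) ∨ (n = "documentation" ∧ s = 4) := by
  unfold PySem.Dict.get? at h
  cases hf : List.find? (fun p => p.1 == n) pvScoreTable.items with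
  | none => rw [hf] at h; simp at h
  | some kv =>
    rw [hf] at h
    simp only [Option.map_some, Option.some.injEq] at h
    have hp := List.find?_some hf
    have hmem := List.mem_of_find?_eq_some hf
    rw [score_items] at hmem
    simp only [beq_iff_eq] at hp
    subst hp h
    simp only [List.mem_cons, List.not_mem_nil, or_false] at hmem
    rcases hmem with h1 | h1 | h1 | h1 | h1 <;> rw [h1] <;> simp

lemma score_none (n : String) (h1 : n ≠ "P1") (h2 : n ≠ "security") (h3 : n ≠ "P2")
    (h4 : n ≠ "P3") (h5 : n ≠ "documentation") : PySem.Dict.get? pvScoreTable n = none := by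
  unfold PySem.Dict.get?
  rw [score_items]
  have e1 : ("P1" == n) = false := beq_eq_false_iff_ne.mpr (Ne.symm h1)
  have e2 : ("security" == n) = false := beq_eq_false_iff_ne.mpr (Ne.symm h2)
  have e3 : ("P2" == n) = false := beq_eq_false_iff_ne.mpr (Ne.symm h3)
  have e4 : ("P3" == n) = false := beq_eq_false_iff_ne.mpr (Ne.symm h4)
  have e5 : ("documentation" == n) = false := beq_eq_false_iff_ne.mpr (Ne.symm h5)
  simp [List.find?, e1, e2, e3, e4, e5]

-- max with default 6 equals v when v is a member and an upper bound
lemma max_case (scores : List Int) (v : Int) (hv : v ∈ scores) (hb : ∀ s ∈ scores, s ≤ v) :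
    (match PySem.List.max? scores (fun x => x) with | some m => m | none => (6 : Int)) = v := by
  cases hmx : PySem.List.max? scores (fun x => x) with
  | none =>
    rw [(PySem.List.max?_eq_none_iff _ _).mp hmx] at hv
    simp at hv
  | some m =>
    have hle := PySem.List.max?_isMax hmx v hv
    have hge := hb m (PySem.List.max?_mem hmx)
    simp only []
    omega

lemma core_eq (names : List String) :
    (match PySem.List.max? (names.filterMap (fun n => PySem.Dict.get? pvScoreTable n)) (fun x => x) with
     | some m => m
     | none => (6 : Int)) =
    (if names.contains "P1" || names.contains "security" then 10
     else if names.contains "P2" then 8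
     else if names.contains "P3" then 5
     else if names.contains "documentation" then 4
     else 6) := by
  set scores := names.filterMap (fun n => PySem.Dict.get? pvScoreTable n) with hs
  have mem_scores : ∀ s ∈ scores, ∃ n ∈ names, PySem.Dict.get? pvScoreTable n = some s := by
    intro s hsmem
    rw [hs] at hsmem
    simpa using List.mem_filterMap.mp hsmem
  split_ifs with g1 g2 g3 g4
  · -- P1 or security present: max is 10
    simp only [Bool.or_eq_true, List.contains_iff_mem] at g1
    apply max_case
    · rw [hs]; apply List.mem_filterMap.mpr
      rcases g1 with h | h
      · exact ⟨"P1", h, by decide⟩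
      · exact ⟨"security", h, by decide⟩
    · intro s hsm
      obtain ⟨n, _, hn⟩ := mem_scores s hsm
      rcases score_inv n s hn with ⟨_, h⟩ | ⟨_, h⟩ | ⟨_, h⟩ | ⟨_, h⟩ | ⟨_, h⟩ <;> omega
  · -- P2 present, P1/security absent: max is 8
    simp only [Bool.or_eq_true, List.contains_iff_mem, not_or] at g1
    simp only [List.contains_iff_mem] at g2
    obtain ⟨nP1, nsec⟩ := g1
    apply max_case
    · rw [hs]; exact List.mem_filterMap.mpr ⟨"P2", g2, by decide⟩
    · intro s hsm
      obtain ⟨n, hnm, hn⟩ := mem_scores s hsm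
      rcases score_inv n s hn with ⟨h, h'⟩ | ⟨h, h'⟩ | ⟨h, h'⟩ | ⟨h, h'⟩ | ⟨h, h'⟩ <;> subst_vars <;>
        first
        | omega
        | exact absurd hnm nP1
        | exact absurd hnm nsec
  · -- P3 present, higher ones absent: max is 5
    simp only [Bool.or_eq_true, List.contains_iff_mem, not_or] at g1
    simp only [List.contains_iff_mem] at g2 g3
    obtain ⟨nP1, nsec⟩ := g1
    apply max_case
    · rw [hs]; exact List.mem_filterMap.mpr ⟨"P3", g3, by decide⟩
    · intro s hsm
      obtain ⟨n, hnm, hn⟩ := mem_scores s hsm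
      rcases score_inv n s hn with ⟨h, h'⟩ | ⟨h, h'⟩ | ⟨h, h'⟩ | ⟨h, h'⟩ | ⟨h, h'⟩ <;> subst_vars <;>
        first
        | omega
        | exact absurd hnm nP1
        | exact absurd hnm nsec
        | exact absurd hnm g2
  · -- documentation present, higher ones absent: max is 4
    simp only [Bool.or_eq_true, List.contains_iff_mem, not_or] at g1
    simp only [List.contains_iff_mem] at g2 g3 g4
    obtain ⟨nP1, nsec⟩ := g1
    apply max_case
    · rw [hs]; exact List.mem_filterMap.mpr ⟨"documentation", g4, by decide⟩
    · intro s hsm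
      obtain ⟨n, hnm, hn⟩ := mem_scores s hsm
      rcases score_inv n s hn with ⟨h, h'⟩ | ⟨h, h'⟩ | ⟨h, h'⟩ | ⟨h, h'⟩ | ⟨h, h'⟩ <;> subst_vars <;>
        first
        | omega
        | exact absurd hnm nP1
        | exact absurd hnm nsec
        | exact absurd hnm g2
        | exact absurd hnm g3
  · -- no priority label present: scores is empty, default 6
    simp only [Bool.or_eq_true, List.contains_iff_mem, not_or] at g1
    simp only [List.contains_iff_mem] at g2 g3 g4
    obtain ⟨nP1, nsec⟩ := g1
    have hempty : scores = [] := by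
      rw [hs]
      apply List.filterMap_eq_nil_iff.mpr
      intro n hnm
      exact score_none n (fun e => nP1 (e ▸ hnm)) (fun e => nsec (e ▸ hnm))
        (fun e => g2 (e ▸ hnm)) (fun e => g3 (e ▸ hnm)) (fun e => g4 (e ▸ hnm))
    rw [hempty]
    simp [PySem.List.max?]

-- ===== VERDICT (by name: the statement is the Claim_ definition above) =====
theorem estimate_impact_from_labels_spec : Claim_equal_estimate_impact_from_labels := by
  intro labels _
  show estimate_impact_from_labels labels = estimate_impact_from_labels_alt labels
  unfold estimate_impact_from_labels estimate_impact_from_labels_alt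
  exact (core_eq (labels.map pvGetName)).symm
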